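-- pv_equiv track=rewrite | github.com/lila-trollkarl/python_projekt_v1 | main.py | check_letters_ok
-- ===== SOURCE A (Python) =====
-- from collections import Counter
--
-- def check_letters_ok(row, merged_row, hand):
--     hand_counts = Counter(hand)
--     wild_cards = hand_counts.pop('*', 0) # Hämta jokrar
--
--     needed_from_hand = []
--     for old, new in zip(row, merged_row):
--         if old == '.' and new != '.':
--             needed_from_hand.append(new)
--
--     needed_counts = Counter(needed_from_hand)
--
--     # Räkna ut vilka bokstäver som saknas *efter* att ha använt vanliga brickor
--     missing = needed_counts - hand_counts
--
--     # Kolla om antalet saknade brickor kan täckas av jokrarna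
--     return sum(missing.values()) <= wild_cards
-- ===== SOURCE B (Python) =====
-- from collections import Counter
--
-- def check_letters_ok(row, merged_row, hand):
--     counts = Counter(hand)
--     wild_cards = counts.pop('*', 0)
--     missing = 0
--     for old, new in zip(row, merged_row):
--         if old == '.' and new != '.':
--             if counts[new] > 0:
--                 counts[new] -= 1
--             else:
--                 missing += 1
--     return missing <= wild_cards
-- ===== Notes on version B (the rewrite author's own statement) =====
-- stated objective: simpler
-- what changed: Replaces the collect-needed-list / Counter-of-needed / Counter-subtraction pipeline by a single greedy pass over zip(row, merged_row) that consumes hand tiles in place and counts the running deficit.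
import Mathlib
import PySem

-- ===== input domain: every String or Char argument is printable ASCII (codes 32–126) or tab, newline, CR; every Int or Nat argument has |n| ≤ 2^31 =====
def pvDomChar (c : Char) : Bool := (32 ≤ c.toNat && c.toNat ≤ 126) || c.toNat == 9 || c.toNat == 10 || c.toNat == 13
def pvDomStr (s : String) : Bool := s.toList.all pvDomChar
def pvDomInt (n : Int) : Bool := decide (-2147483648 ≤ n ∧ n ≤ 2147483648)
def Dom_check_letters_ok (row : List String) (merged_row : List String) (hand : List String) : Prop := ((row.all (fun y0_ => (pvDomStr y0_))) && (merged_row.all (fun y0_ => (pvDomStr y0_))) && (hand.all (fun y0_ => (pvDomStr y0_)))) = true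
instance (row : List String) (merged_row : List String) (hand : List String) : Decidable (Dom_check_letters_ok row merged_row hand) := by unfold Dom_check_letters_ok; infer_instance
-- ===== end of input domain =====

-- B replaces A's collect-needed-list / Counter(needed) / Counter-subtraction pipeline by one
-- greedy pass over zip(row, merged_row) that consumes hand tiles in place and counts the deficit
-- (objective: simpler; same return value).

-- ===== PORT A =====
def check_letters_ok (row : List String) (merged_row : List String) (hand : List String) : Bool :=
  let hand_counts0 := PySem.Dict.counter hand
  let wild_cards := hand_counts0.getD "*" 0          -- hand_counts.pop('*', 0)
  let hand_counts := hand_counts0.erase "*"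
  let needed_from_hand := (row.zip merged_row).foldl
    (fun acc p => if p.1 == "." && p.2 != "." then acc ++ [p.2] else acc) []
  let needed_counts := PySem.Dict.counter needed_from_hand
  -- missing = needed_counts - hand_counts: collections.Counter.__sub__, step for step
  -- (first loop over self.items(), keep positive differences; second loop over other.items())
  let missing := needed_counts.items.foldl
    (fun r q => let nc := q.2 - hand_counts.getD q.1 0;
                if nc > 0 then r.insert q.1 nc else r) PySem.Dict.empty
  let missing := hand_counts.items.foldl
    (fun r q => if !needed_counts.contains q.1 && decide (q.2 < 0)
                then r.insert q.1 (-q.2) else r) missing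
  decide (missing.values.sum ≤ wild_cards)

-- ===== PORT B =====
def check_letters_ok_alt (row : List String) (merged_row : List String) (hand : List String) : Bool :=
  let counts0 := PySem.Dict.counter hand
  let wild_cards := counts0.getD "*" 0               -- counts.pop('*', 0)
  let counts := counts0.erase "*"
  let st := (row.zip merged_row).foldl
    (fun st p =>
      if p.1 == "." && p.2 != "." then
        if st.1.getD p.2 0 > 0 then (st.1.insert p.2 (st.1.getD p.2 0 - 1), st.2)
        else (st.1, st.2 + 1)
      else st) (counts, (0 : Int))
  decide (st.2 ≤ wild_cards)

-- ===== PRECONDITION & SPEC =====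
def Spec_check_letters_ok (row : List String) (merged_row : List String) (hand : List String) (out : Bool) : Prop := out = check_letters_ok_alt row merged_row hand
instance (row : List String) (merged_row : List String) (hand : List String) (out : Bool) : Decidable (Spec_check_letters_ok row merged_row hand out) := by unfold Spec_check_letters_ok; infer_instance

-- ===== CLAIM (what is proved, stated in full; the proofs are below) =====
def Claim_equal_check_letters_ok : Prop := ∀ (row : List String) (merged_row : List String) (hand : List String), Dom_check_letters_ok row merged_row hand → Spec_check_letters_ok row merged_row hand (check_letters_ok row merged_row hand)

-- ===== LEMMAS AND PROOFS =====

-- positive part, the value a Counter subtraction keeps per key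
def pvPos (x : Int) : Int := if x > 0 then x else 0

-- values of the erased hand counter are letter counts, hence nonnegative
lemma pv_hc_items_nonneg (hand : List String) :
    ∀ q ∈ ((PySem.Dict.counter hand).erase "*").items, 0 ≤ q.2 := by
  intro q hq
  simp only [PySem.Dict.erase, List.mem_filter] at hq
  have h1 := hq.1
  rw [PySem.Dict.items_counter] at h1
  simp only [List.mem_map] at h1
  obtain ⟨k, _, hk⟩ := h1
  subst hk
  exact Int.natCast_nonneg _

lemma pv_values_nonneg_of_items (d : PySem.Dict String Int)
    (h : ∀ q ∈ d.items, 0 ≤ q.2) : ∀ w ∈ d.values, 0 ≤ w := by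
  intro w hw
  simp only [PySem.Dict.values, List.mem_map] at hw
  obtain ⟨q, hq, rfl⟩ := hw
  exact h q hq

lemma pv_getD_nonneg (d : PySem.Dict String Int)
    (h : ∀ w ∈ d.values, 0 ≤ w) (k : String) : 0 ≤ d.getD k 0 := by
  unfold PySem.Dict.getD PySem.Dict.get?
  cases hf : List.find? (fun p => p.1 == k) d.items with
  | none => simp
  | some q =>
      simp only [Option.map_some, Option.getD_some]
      exact h q.2 (by
        simp only [PySem.Dict.values, List.mem_map]
        exact ⟨q, List.mem_of_find?_eq_some hf, rfl⟩)

-- Counter.__sub__'s second loop does nothing when the other counter has no negative counts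
lemma pv_secondloop (nc : PySem.Dict String Int) :
    ∀ (qs : List (String × Int)) (r : PySem.Dict String Int),
      (∀ q ∈ qs, 0 ≤ q.2) →
      qs.foldl (fun r q => if !nc.contains q.1 && decide (q.2 < 0)
                           then r.insert q.1 (-q.2) else r) r = r := by
  intro qs
  induction qs with
  | nil => intro r _; rfl
  | cons q t ih =>
      intro r h
      have h0 : ¬ q.2 < 0 := not_lt.mpr (h q (List.mem_cons_self))
      simp only [List.foldl_cons, h0, decide_false, Bool.and_false, Bool.false_eq_true,
        if_false]
      exact ih r (fun q hq => h q (List.mem_cons_of_mem _ hq))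

-- Counter.__sub__'s first loop: over fresh distinct keys the values of the result sum
-- to the sum of the positive parts
lemma pv_subsum (d : PySem.Dict String Int) :
    ∀ (ps : List (String × Int)) (r : PySem.Dict String Int),
      (ps.map Prod.fst).Nodup → (∀ q ∈ ps, r.contains q.1 = false) →
      (ps.foldl (fun r q => if q.2 - d.getD q.1 0 > 0
                            then r.insert q.1 (q.2 - d.getD q.1 0) else r) r).values.sum
        = r.values.sum + (ps.map (fun q => pvPos (q.2 - d.getD q.1 0))).sum := by
  intro ps
  induction ps with
  | nil => intro r _ _; simp
  | cons q t ih =>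
      intro r hnd hfr
      have hndt : (t.map Prod.fst).Nodup := (List.nodup_cons.mp hnd).2
      have hqn : q.1 ∉ t.map Prod.fst := (List.nodup_cons.mp hnd).1
      simp only [List.foldl_cons, List.map_cons, List.sum_cons]
      by_cases hpos : q.2 - d.getD q.1 0 > 0
      · rw [if_pos hpos]
        rw [ih (r.insert q.1 (q.2 - d.getD q.1 0))
              hndt
              (by
                intro q' hq'
                rw [PySem.Dict.contains_insert]
                have hne : q'.1 ≠ q.1 := by
                  intro he
                  exact hqn (he ▸ List.mem_map_of_mem hq')
                simp [hne, hfr q' (List.mem_cons_of_mem _ hq')])]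
        have hins : (r.insert q.1 (q.2 - d.getD q.1 0)).values
            = r.values ++ [q.2 - d.getD q.1 0] := by
          rw [PySem.Dict.values,
            PySem.Dict.items_insert_of_not_contains r _ (hfr q List.mem_cons_self)]
          simp [PySem.Dict.values]
        rw [hins]
        simp only [List.sum_append, List.sum_cons, List.sum_nil, pvPos, if_pos hpos]
        ring
      · rw [if_neg hpos]
        rw [ih r hndt (fun q' hq' => hfr q' (List.mem_cons_of_mem _ hq'))]
        simp only [pvPos, if_neg hpos]
        ring

-- B's loop over all board positions is its inner step run over the needed letters only
lemma pv_b_restrict :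
    ∀ (zs : List (String × String)) (st : PySem.Dict String Int × Int),
      zs.foldl (fun st p =>
          if p.1 == "." && p.2 != "." then
            if st.1.getD p.2 0 > 0 then (st.1.insert p.2 (st.1.getD p.2 0 - 1), st.2)
            else (st.1, st.2 + 1)
          else st) st
        = ((zs.filter (fun p => p.1 == "." && p.2 != ".")).map (fun p => p.2)).foldl
            (fun st x =>
              if st.1.getD x 0 > 0 then (st.1.insert x (st.1.getD x 0 - 1), st.2)
              else (st.1, st.2 + 1)) st := by
  intro zs
  induction zs with
  | nil => intro st; rfl
  | cons z t ih =>
      intro st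
      simp only [List.foldl_cons, List.filter_cons]
      by_cases h : (z.1 == "." && z.2 != ".") = true
      · simp only [h, if_true, List.map_cons, List.foldl_cons]
        exact ih _
      · simp only [h, if_false, Bool.false_eq_true]
        exact ih st

-- the greedy pass computes the same total deficit
lemma pv_greedy (K : List String) (hK : K.Nodup) :
    ∀ (ms : List String) (d : PySem.Dict String Int) (m : Int),
      (∀ w ∈ d.values, 0 ≤ w) → (∀ x ∈ ms, x ∈ K) →
      (ms.foldl (fun st x =>
          if st.1.getD x 0 > 0 then (st.1.insert x (st.1.getD x 0 - 1), st.2)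
          else (st.1, st.2 + 1)) (d, m)).2
        = m + (K.map (fun k => pvPos ((ms.count k : Int) - d.getD k 0))).sum := by
  intro ms
  induction ms with
  | nil =>
      intro d m hd _
      simp only [List.foldl_nil]
      have : (K.map (fun k => pvPos ((List.count k ([] : List String) : Int) - d.getD k 0))).sum = 0 := by
        apply List.sum_eq_zero
        intro x hx
        simp only [List.mem_map] at hx
        obtain ⟨k, _, rfl⟩ := hx
        have := pv_getD_nonneg d hd k
        simp only [List.count_nil, Int.natCast_zero, zero_sub, pvPos]
        rw [if_neg (by omega)]
      rw [this]; ring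
  | cons x t ih =>
      intro d m hd hm
      have hx : x ∈ K := hm x List.mem_cons_self
      have hmt : ∀ y ∈ t, y ∈ K := fun y hy => hm y (List.mem_cons_of_mem _ hy)
      simp only [List.foldl_cons]
      by_cases hv : d.getD x 0 > 0
      · rw [if_pos hv]
        have hd' : ∀ w ∈ (d.insert x (d.getD x 0 - 1)).values, 0 ≤ w := by
          intro w hw
          rcases PySem.Dict.mem_values_insert d x (d.getD x 0 - 1) w hw with rfl | hv'
          · omega
          · exact hd w hv'
        rw [ih (d.insert x (d.getD x 0 - 1)) m hd' hmt]
        congr 1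
        apply congrArg
        apply List.map_congr_left
        intro k _
        rw [PySem.Dict.getD_insert]
        by_cases hkx : k = x
        · subst hkx
          rw [if_pos rfl]
          have hc1 : ((k :: t).count k : Int) = (t.count k : Int) + 1 := by
            simp [List.count_cons]
          rw [hc1]
          congr 1
          omega
        · rw [if_neg hkx]
          have hxk2 : ¬x = k := fun h => hkx h.symm
          have hc2 : ((x :: t).count k : Int) = (t.count k : Int) := by
            simp [List.count_cons, hkx, hxk2]
          rw [hc2]
      · rw [if_neg hv]
        have hv0 : d.getD x 0 = 0 := by
          have := pv_getD_nonneg d hd x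
          omega
        rw [ih d (m + 1) hd hmt]
        have hsplit :
            (K.map (fun k => pvPos (((x :: t).count k : Int) - d.getD k 0))).sum
              = (K.map (fun k => pvPos ((t.count k : Int) - d.getD k 0)
                  + (if k == x then (1 : Int) else 0))).sum := by
          apply congrArg
          apply List.map_congr_left
          intro k _
          by_cases hkx : k = x
          · subst hkx
            have hc : ((k :: t).count k : Int) = (t.count k : Int) + 1 := by
              simp [List.count_cons_self]
            rw [hc, hv0]
            simp only [BEq.rfl, if_pos]
            unfold pvPos
            have : (0 : Int) ≤ (t.count k : Int) := Int.natCast_nonneg _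
            split_ifs <;> omega
          · have hxk3 : ¬x = k := fun h => hkx h.symm
            have hc3 : ((x :: t).count k : Int) = (t.count k : Int) := by
              simp [List.count_cons, hkx, hxk3]
            rw [hc3]
            simp [hkx]
        rw [hsplit, PySem.List.sum_map_add_int, PySem.List.sum_map_ite_one_zero]
        have hcnt : K.countP (fun k => k == x) = 1 := by
          have : K.count x = 1 := List.count_eq_one_of_mem hK hx
          simpa [List.count] using this
        rw [hcnt]
        push_cast
        ring

-- ===== VERDICT (by name: the statement is the Claim_ definition above) =====
theorem check_letters_ok_spec : Claim_equal_check_letters_ok := by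
  intro row merged_row hand _
  unfold Spec_check_letters_ok check_letters_ok check_letters_ok_alt
  simp only [PySem.List.foldl_append_if, List.nil_append]
  set hc := (PySem.Dict.counter hand).erase "*" with hhc
  set ns := ((row.zip merged_row).filter (fun p => p.1 == "." && p.2 != ".")).map
      (fun p => p.2) with hns
  have hnn : ∀ w ∈ hc.values, 0 ≤ w :=
    pv_values_nonneg_of_items hc (pv_hc_items_nonneg hand)
  -- A side: the second Counter.__sub__ loop is the identity, the first sums positive parts
  rw [pv_secondloop (PySem.Dict.counter ns) hc.items _ (pv_hc_items_nonneg hand)]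
  rw [PySem.Dict.items_counter]
  rw [pv_subsum hc ((PySem.Set.ofList ns).map (fun k => (k, (ns.count k : Int)))) PySem.Dict.empty
        (by simp [List.map_map, Function.comp_def, PySem.Set.nodup_ofList])
        (by intro q _; simp [PySem.Dict.contains, PySem.Dict.empty])]
  -- B side: restrict the loop to the needed positions and run the greedy lemma
  rw [pv_b_restrict]
  rw [pv_greedy (PySem.Set.ofList ns) (PySem.Set.nodup_ofList ns) ns hc 0 hnn
        (fun x hx => (PySem.Set.mem_ofList ns x).mpr hx)]
  simp [PySem.Dict.values, PySem.Dict.empty, List.map_map, Function.comp_def]
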